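-- pv_equiv track=rewrite | github.com/imteekay/algorithms | interview_training/leetcode/medium/finding_the_users_active_minutes/finding_the_users_active_minutes.py | build_answer
-- ===== SOURCE A (Python) =====
-- def build_answer(count_by_actions_number, k):
--     answer = []
--
--     for num in range(1, k + 1):
--         if num in count_by_actions_number:
--             answer.append(count_by_actions_number[num])
--         else:
--             answer.append(0)
--
--     return answer
-- ===== SOURCE B (Python) =====
-- def build_answer(count_by_actions_number, k):
--     answer = [0] * k
--     for key, val in count_by_actions_number.items():
--         if 1 <= key <= k:
--             answer[key - 1] = val
--     return answer
-- ===== Notes on version B (the rewrite author's own statement) =====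
-- stated objective: alternative
-- what changed: Instead of iterating over range(1, k+1) and looking each index up in the dict, B preallocates [0]*k and scatters the dict's items into it, guarding keys to the 1..k window; Pre_ excludes association lists with duplicate keys, which do not represent any Python dict.
import Mathlib
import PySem

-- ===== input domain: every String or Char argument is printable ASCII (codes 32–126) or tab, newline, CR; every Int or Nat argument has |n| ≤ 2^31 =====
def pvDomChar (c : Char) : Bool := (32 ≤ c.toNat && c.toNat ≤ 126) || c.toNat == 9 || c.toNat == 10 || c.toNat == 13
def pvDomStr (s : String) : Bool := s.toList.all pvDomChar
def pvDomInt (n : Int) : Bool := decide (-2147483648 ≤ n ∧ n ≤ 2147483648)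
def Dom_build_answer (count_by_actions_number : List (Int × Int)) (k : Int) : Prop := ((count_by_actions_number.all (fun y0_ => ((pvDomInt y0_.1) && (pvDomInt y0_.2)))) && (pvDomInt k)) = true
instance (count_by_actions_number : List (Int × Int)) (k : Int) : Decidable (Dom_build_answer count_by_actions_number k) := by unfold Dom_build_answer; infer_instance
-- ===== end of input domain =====

-- B scatters the dict's items into a preallocated [0]*k array instead of looking up each index of 1..k (alternative decomposition).

-- ===== PORT A =====
-- answer = []; for num in range(1, k+1): append d[num] if num in d else 0
def build_answer (count_by_actions_number : List (Int × Int)) (k : Int) : List Int :=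
  let d := PySem.Dict.mk count_by_actions_number
  (PySem.List.pyRange 1 (k + 1) 1).foldl
    (fun answer num =>
      match d.get? num with
      | some v => answer ++ [v]
      | none => answer ++ [0])
    []

-- ===== PORT B =====
-- answer = [0]*k; for (key, val) in items: if 1 <= key <= k: answer[key-1] = val
def build_answer_alt (count_by_actions_number : List (Int × Int)) (k : Int) : List Int :=
  count_by_actions_number.foldl
    (fun answer p =>
      if 1 ≤ p.1 ∧ p.1 ≤ k then PySem.List.pySetD answer (p.1 - 1) p.2 else answer)
    (List.replicate k.toNat 0)

-- ===== PRECONDITION & SPEC =====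
-- Pre_ excludes association lists with duplicate keys: they do not represent any Python dict
-- (the argument is a dict, whose keys are unique), so A never receives them.
def Pre_build_answer (count_by_actions_number : List (Int × Int)) (k : Int) : Prop :=
  (count_by_actions_number.map Prod.fst).Nodup
instance (count_by_actions_number : List (Int × Int)) (k : Int) : Decidable (Pre_build_answer count_by_actions_number k) := by unfold Pre_build_answer; infer_instance
def pvWitness_build_answer : (List (Int × Int)) × Int := ([(1, 5), (3, 2), (7, 1)], 4)

def Spec_build_answer (count_by_actions_number : List (Int × Int)) (k : Int) (out : List Int) : Prop := out = build_answer_alt count_by_actions_number k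
instance (count_by_actions_number : List (Int × Int)) (k : Int) (out : List Int) : Decidable (Spec_build_answer count_by_actions_number k out) := by unfold Spec_build_answer; infer_instance

-- ===== CLAIM (what is proved, stated in full; the proofs are below) =====
def Claim_equal_build_answer : Prop := ∀ (count_by_actions_number : List (Int × Int)) (k : Int), Dom_build_answer count_by_actions_number k → Pre_build_answer count_by_actions_number k → Spec_build_answer count_by_actions_number k (build_answer count_by_actions_number k)

-- ===== LEMMAS AND PROOFS =====

-- A's lookup, expressed as the first match in the association list.
lemma get?_mk_eq_find? (l : List (Int × Int)) (j : Int) :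
    (PySem.Dict.mk l).get? j = (l.find? (fun p => p.1 == j)).map Prod.snd := by
  induction l with
  | nil => simp [PySem.Dict.get?]
  | cons p rest ih =>
      rw [PySem.Dict.get?_mk_cons]
      by_cases h : p.1 = j
      · simp [h, List.find?]
      · have hb : (p.1 == j) = false := by simpa using h
        simp [List.find?, hb, ih]

-- Folding B's scatter step over a list with distinct keys: the entry at index i is
-- the value stored under key i+1, or the old entry if that key is absent.
lemma scatter_getElem? (k : Int) (l : List (Int × Int)) (hl : (l.map Prod.fst).Nodup)
    (ans : List Int) (hlen : ans.length = k.toNat) (i : Nat) (hi : i < k.toNat) :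
    (l.foldl (fun answer p =>
        if 1 ≤ p.1 ∧ p.1 ≤ k then PySem.List.pySetD answer (p.1 - 1) p.2 else answer) ans)[i]?
      = some (((l.find? (fun p => p.1 == (i : Int) + 1)).map Prod.snd).getD (ans.getD i 0)) := by
  induction l generalizing ans with
  | nil =>
      have hi' : i < ans.length := by omega
      simp [List.getD, List.getElem?_eq_getElem hi']
  | cons p rest ih =>
      simp only [List.map_cons, List.nodup_cons, List.mem_map] at hl
      obtain ⟨hnotin, hnd⟩ := hl
      simp only [List.foldl_cons, List.find?_cons]
      by_cases hpk : p.1 = (i : Int) + 1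
      · have hb : (p.1 == (i : Int) + 1) = true := by simpa using hpk
        have hwin : 1 ≤ p.1 ∧ p.1 ≤ k := by
          have : (i : Int) < k.toNat := by exact_mod_cast hi
          constructor <;> omega
        have hset : PySem.List.pySetD ans (p.1 - 1) p.2 = ans.set i p.2 := by
          have h1 : p.1 - 1 = ((i : Nat) : Int) := by omega
          rw [h1, PySem.List.pySetD_natCast]
        rw [if_pos hwin, hset, hb]
        have hfind : rest.find? (fun q => q.1 == (i : Int) + 1) = none := by
          apply List.find?_eq_none.2
          intro q hq
          simp only [beq_iff_eq]
          intro hq1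
          exact hnotin ⟨q, hq, by rw [hq1, ← hpk]⟩
        rw [ih hnd _ (by simpa using hlen), hfind]
        have hi' : i < ans.length := by omega
        simp [List.getD, hi']
      · have hb : (p.1 == (i : Int) + 1) = false := by simpa using hpk
        rw [hb]
        by_cases hwin : 1 ≤ p.1 ∧ p.1 ≤ k
        · rw [if_pos hwin]
          have hne : (p.1 - 1).toNat ≠ i := by omega
          have hset : PySem.List.pySetD ans (p.1 - 1) p.2 = ans.set (p.1 - 1).toNat p.2 := by
            have h1 : p.1 - 1 = (((p.1 - 1).toNat : Nat) : Int) := by omega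
            rw [h1, PySem.List.pySetD_natCast, Int.toNat_natCast]
          rw [hset, ih hnd _ (by simpa using hlen)]
          have h2 : (ans.set (p.1 - 1).toNat p.2)[i]? = ans[i]? := List.getElem?_set_ne hne
          simp only [List.getD, h2]
        · rw [if_neg hwin, ih hnd _ hlen]

lemma length_scatter (k : Int) (l : List (Int × Int)) (ans : List Int) :
    (l.foldl (fun answer p =>
        if 1 ≤ p.1 ∧ p.1 ≤ k then PySem.List.pySetD answer (p.1 - 1) p.2 else answer) ans).length
      = ans.length := by
  induction l generalizing ans with
  | nil => rfl
  | cons p rest ih =>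
      simp only [List.foldl_cons]
      split_ifs with h
      · rw [ih, PySem.List.length_pySetD]
      · exact ih ans

-- ===== VERDICT (by name: the statement is the Claim_ definition above) =====
theorem build_answer_spec : Claim_equal_build_answer := by
  intro l k _ hpre
  unfold Spec_build_answer build_answer build_answer_alt
  have hbody : ∀ (ans : List Int) (num : Int),
      (match (PySem.Dict.mk l).get? num with
       | some v => ans ++ [v]
       | none => ans ++ [0])
        = ans ++ [((l.find? (fun p => p.1 == num)).map Prod.snd).getD 0] := by
    intro ans num
    rw [get?_mk_eq_find?]
    cases l.find? (fun p => p.1 == num) <;> simp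
  simp only [hbody]
  rw [PySem.List.foldl_append_singleton_eq_map, List.nil_append]
  apply List.ext_getElem?
  intro i
  by_cases hi : i < k.toNat
  · have hlenR : (PySem.List.pyRange 1 (k + 1) 1).length = k.toNat := by
      rw [PySem.List.length_pyRange_one]; omega
    have hA : (List.map (fun num => ((l.find? (fun p => p.1 == num)).map Prod.snd).getD 0)
        (PySem.List.pyRange 1 (k + 1) 1))[i]?
        = some (((l.find? (fun p => p.1 == (i : Int) + 1)).map Prod.snd).getD 0) := by
      rw [List.getElem?_map]
      rw [List.getElem?_eq_getElem (by omega : i < (PySem.List.pyRange 1 (k + 1) 1).length)]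
      rw [PySem.List.getElem_pyRange_one]
      simp [add_comm]
    rw [hA, scatter_getElem? k l hpre _ (by simp) i hi]
    simp [List.getD, hi]
  · have h1 : (List.map (fun num => ((l.find? (fun p => p.1 == num)).map Prod.snd).getD 0)
        (PySem.List.pyRange 1 (k + 1) 1))[i]? = none := by
      rw [List.getElem?_eq_none] ; rw [List.length_map, PySem.List.length_pyRange_one]; omega
    have h2 : (l.foldl (fun answer p =>
        if 1 ≤ p.1 ∧ p.1 ≤ k then PySem.List.pySetD answer (p.1 - 1) p.2 else answer)
        (List.replicate k.toNat 0))[i]? = none := by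
      rw [List.getElem?_eq_none]; rw [length_scatter]; simp; omega
    rw [h1, h2]
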